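-- pv_equiv track=rewrite | github.com/26hzhang/AmusingPythonCodes | stanford_corenlp_demo/stanford_corenlp.py | __check_pronominal
-- ===== SOURCE A (Python) =====
-- def __check_pronominal(coref_chain):
--     pronoun = 0
--     other = 0
--     for val in coref_chain:
--         if val['type'] == 'PRONOMINAL':
--             pronoun += 1
--         else:
--             other += 1
--     if pronoun == len(coref_chain) or other == len(coref_chain):
--         return True
--     else:
--         return False
-- ===== SOURCE B (Python) =====
-- def __check_pronominal(coref_chain):
--     flags = {v['type'] == 'PRONOMINAL' for v in coref_chain}
--     return len(flags) <= 1
-- ===== Notes on version B (the rewrite author's own statement) =====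
-- stated objective: simpler
-- what changed: Replaces the two running counters compared against len(coref_chain) by a set of the distinct is-pronominal flags, deciding homogeneity by the set's cardinality (<= 1).
import Mathlib
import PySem

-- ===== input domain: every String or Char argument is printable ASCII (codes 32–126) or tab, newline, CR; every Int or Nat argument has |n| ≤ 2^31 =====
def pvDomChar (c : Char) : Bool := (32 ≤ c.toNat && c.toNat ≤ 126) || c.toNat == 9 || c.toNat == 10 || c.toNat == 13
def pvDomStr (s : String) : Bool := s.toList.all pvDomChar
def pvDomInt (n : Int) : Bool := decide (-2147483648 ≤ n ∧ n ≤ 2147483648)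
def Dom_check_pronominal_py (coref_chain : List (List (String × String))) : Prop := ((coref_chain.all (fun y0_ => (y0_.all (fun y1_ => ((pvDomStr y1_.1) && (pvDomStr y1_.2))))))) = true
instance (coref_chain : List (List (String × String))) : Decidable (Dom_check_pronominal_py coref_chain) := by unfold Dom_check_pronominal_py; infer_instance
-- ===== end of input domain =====

-- B replaces A's two counters compared against the length by the set of distinct
-- is-pronominal flags, deciding via its cardinality; Pre_ excludes chains where a
-- mention lacks the 'type' key (both programs raise KeyError there).
-- ===== PORT A =====
def pvTypeIsPron (val : List (String × String)) : Bool :=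
  (PySem.Dict.getD (PySem.Dict.ofList val) "type" "") == "PRONOMINAL"

def check_pronominal_py (coref_chain : List (List (String × String))) : Bool :=
  let st := coref_chain.foldl
    (fun (s : Int × Int) val =>
      if pvTypeIsPron val then (s.1 + 1, s.2) else (s.1, s.2 + 1))
    (0, 0)
  if st.1 = (coref_chain.length : Int) ∨ st.2 = (coref_chain.length : Int) then true else false

-- ===== PORT B =====
def check_pronominal_py_alt (coref_chain : List (List (String × String))) : Bool :=
  let flags : PySem.Set Bool := PySem.Set.ofList (coref_chain.map pvTypeIsPron)
  decide (PySem.Set.len flags ≤ 1)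

-- ===== PRECONDITION & SPEC =====
-- Pre_ excludes exactly the inputs where some mention dict has no 'type' key: there
-- Python A (and B) raise KeyError.
def Pre_check_pronominal_py (coref_chain : List (List (String × String))) : Prop :=
  ∀ val ∈ coref_chain, (val.any (fun p => p.1 == "type")) = true
instance (coref_chain : List (List (String × String))) : Decidable (Pre_check_pronominal_py coref_chain) := by unfold Pre_check_pronominal_py; infer_instance

def pvWitness_check_pronominal_py : (List (List (String × String))) :=
  [[("type", "PRONOMINAL")], [("type", "NOMINAL")]]

def Spec_check_pronominal_py (coref_chain : List (List (String × String))) (out : Bool) : Prop := out = check_pronominal_py_alt coref_chain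
instance (coref_chain : List (List (String × String))) (out : Bool) : Decidable (Spec_check_pronominal_py coref_chain out) := by unfold Spec_check_pronominal_py; infer_instance

-- ===== CLAIM (what is proved, stated in full; the proofs are below) =====
def Claim_equal_check_pronominal_py : Prop := ∀ (coref_chain : List (List (String × String))), Dom_check_pronominal_py coref_chain → Pre_check_pronominal_py coref_chain → Spec_check_pronominal_py coref_chain (check_pronominal_py coref_chain)

-- ===== LEMMAS AND PROOFS =====

-- A's counting loop computes (init.1 + #pronominal, init.2 + #other).
lemma foldl_counts (l : List (List (String × String))) (a b : Int) :
    l.foldl (fun (s : Int × Int) val =>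
      if pvTypeIsPron val then (s.1 + 1, s.2) else (s.1, s.2 + 1)) (a, b)
    = (a + (l.countP pvTypeIsPron : Int), b + (l.countP (fun v => !pvTypeIsPron v) : Int)) := by
  induction l generalizing a b with
  | nil => simp
  | cons x t ih =>
    by_cases h : pvTypeIsPron x = true <;>
      simp [List.foldl_cons, h, ih] <;> ring

-- A nodup list of Bools has at most one element iff it does not contain both values.
lemma bool_nodup_len_le_one (s : List Bool) (h : s.Nodup) :
    s.length ≤ 1 ↔ ¬ (true ∈ s ∧ false ∈ s) := by
  match s, h with
  | [], _ => simp
  | [a], _ => cases a <;> simp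
  | a :: b :: t, h =>
    constructor
    · intro hl; simp at hl
    · intro hc
      exfalso
      rcases List.nodup_cons.1 h with ⟨hab, _⟩
      cases a <;> cases b <;> simp_all


lemma a_eq_decide (l : List (List (String × String))) :
    check_pronominal_py l = decide ((∀ v ∈ l, pvTypeIsPron v = true) ∨ (∀ v ∈ l, pvTypeIsPron v = false)) := by
  unfold check_pronominal_py
  rw [foldl_counts]
  have h1 : ((l.countP pvTypeIsPron : Int) = (l.length : Int)) ↔ ∀ v ∈ l, pvTypeIsPron v = true := by
    rw [Nat.cast_inj]; exact List.countP_eq_length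
  have h2 : ((l.countP (fun v => !pvTypeIsPron v) : Int) = (l.length : Int)) ↔ ∀ v ∈ l, pvTypeIsPron v = false := by
    rw [Nat.cast_inj, List.countP_eq_length]
    constructor
    · intro h v hv; simpa using h v hv
    · intro h v hv; simp [h v hv]
  simp only [zero_add, h1, h2]
  by_cases hA : ∀ v ∈ l, pvTypeIsPron v = true <;>
    by_cases hB : ∀ v ∈ l, pvTypeIsPron v = false <;> simp [hA, hB]

lemma b_eq_decide (l : List (List (String × String))) :
    check_pronominal_py_alt l = decide ((∀ v ∈ l, pvTypeIsPron v = true) ∨ (∀ v ∈ l, pvTypeIsPron v = false)) := by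
  unfold check_pronominal_py_alt
  have hnd := PySem.Set.nodup_ofList (l.map pvTypeIsPron)
  have h1 := bool_nodup_len_le_one _ hnd
  have hmt := PySem.Set.mem_ofList (l.map pvTypeIsPron) true
  have hmf := PySem.Set.mem_ofList (l.map pvTypeIsPron) false
  rw [hmt, hmf] at h1
  have hK : PySem.Set.len (PySem.Set.ofList (l.map pvTypeIsPron)) ≤ 1 ↔ ((∀ v ∈ l, pvTypeIsPron v = true) ∨ (∀ v ∈ l, pvTypeIsPron v = false)) := by
    have hcast : PySem.Set.len (PySem.Set.ofList (l.map pvTypeIsPron)) ≤ 1 ↔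
        (PySem.Set.ofList (l.map pvTypeIsPron)).length ≤ 1 := by
      unfold PySem.Set.len; exact_mod_cast Iff.rfl
    rw [hcast, h1]
    constructor
    · intro h
      by_cases hA : ∀ v ∈ l, pvTypeIsPron v = true
      · exact Or.inl hA
      · refine Or.inr ?_
        intro v hv
        by_contra hvne
        have hvt : pvTypeIsPron v = true := by simpa using hvne
        push_neg at hA
        rcases hA with ⟨w, hw, hwne⟩
        have hwf : pvTypeIsPron w = false := by simpa using hwne
        exact h ⟨List.mem_map.2 ⟨v, hv, hvt⟩, List.mem_map.2 ⟨w, hw, hwf⟩⟩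
    · rintro hP ⟨ht, hf⟩
      rcases List.mem_map.1 ht with ⟨v, hv, hvt⟩
      rcases List.mem_map.1 hf with ⟨w, hw, hwf⟩
      rcases hP with h | h
      · rw [h w hw] at hwf; exact Bool.true_eq_false.mp hwf
      · rw [h v hv] at hvt; exact Bool.false_eq_true.mp hvt
  exact decide_eq_decide.mpr hK

-- ===== VERDICT (by name: the statement is the Claim_ definition above) =====
theorem check_pronominal_py_spec : Claim_equal_check_pronominal_py := by
  intro l _ _
  unfold Spec_check_pronominal_py
  rw [a_eq_decide, b_eq_decide]
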